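-- pv_equiv track=rewrite | github.com/AlexPizarro7/Ptolemy | src/utilities/astro_utils.py | get_traditional_decan
-- ===== SOURCE A (Python) =====
-- def get_traditional_decan(sign, sign_degrees):
--     """
--     This function identifies the ruling planet of the decan for in which a planet is currently in, given the sign in question and the sign degrees the planet is in. This function uses the Chaldean order system, which is used in tradtional astrology.
--
--     Parameters:
--     - sign (str): The zodiac sign (e.g., 'Aries', 'Taurus', etc.).
--     - sign_degrees (int): The degree within the sign (0-29).
--
--     Returns:
--     - str: The name of the planet ruling the decan of the given sign and degree.
--     Returns None if the sign is not recognized or if the degree is out of bounds.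
--     """
--
--     decans = {
--         'Aries': [('Mars', 0, 10), ('Sun', 10, 20), ('Venus', 20, 30)],
--         'Taurus': [('Mercury', 0, 10), ('Moon', 10, 20), ('Saturn', 20, 30)],
--         'Gemini': [('Jupiter', 0, 10), ('Mars', 10, 20), ('Sun', 20, 30)],
--         'Cancer': [('Venus', 0, 10), ('Mercury', 10, 20), ('Moon', 20, 30)],
--         'Leo': [('Saturn', 0, 10), ('Jupiter', 10, 20), ('Mars', 20, 30)],
--         'Virgo': [('Sun', 0, 10), ('Venus', 10, 20), ('Mercury', 20, 30)],
--         'Libra': [('Moon', 0, 10), ('Saturn', 10, 20), ('Jupiter', 20, 30)],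
--         'Scorpio': [('Mars', 0, 10), ('Sun', 10, 20), ('Venus', 20, 30)],
--         'Sagittarius': [('Mercury', 0, 10), ('Moon', 10, 20), ('Saturn', 20, 30)],
--         'Capricorn': [('Jupiter', 0, 10), ('Mars', 10, 20), ('Sun', 20, 30)],
--         'Aquarius': [('Venus', 0, 10), ('Mercury', 10, 20), ('Moon', 20, 30)],
--         'Pisces': [('Saturn', 0, 10), ('Jupiter', 10, 20), ('Mars', 20, 30)]
--     }
--
--     for ruler, start, end in decans.get(sign, []):
--         if start <= sign_degrees < end:
--             return ruler  # Returning only the ruler of the decan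
--     return None
-- ===== SOURCE B (Python) =====
-- # Closed-form lookup: a sign -> [decan0, decan1, decan2] table indexed by degree // 10.
-- _DECAN_RULERS = {
--     'Aries': ['Mars', 'Sun', 'Venus'],
--     'Taurus': ['Mercury', 'Moon', 'Saturn'],
--     'Gemini': ['Jupiter', 'Mars', 'Sun'],
--     'Cancer': ['Venus', 'Mercury', 'Moon'],
--     'Leo': ['Saturn', 'Jupiter', 'Mars'],
--     'Virgo': ['Sun', 'Venus', 'Mercury'],
--     'Libra': ['Moon', 'Saturn', 'Jupiter'],
--     'Scorpio': ['Mars', 'Sun', 'Venus'],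
--     'Sagittarius': ['Mercury', 'Moon', 'Saturn'],
--     'Capricorn': ['Jupiter', 'Mars', 'Sun'],
--     'Aquarius': ['Venus', 'Mercury', 'Moon'],
--     'Pisces': ['Saturn', 'Jupiter', 'Mars'],
-- }
--
-- def get_traditional_decan(sign, sign_degrees):
--     rulers = _DECAN_RULERS.get(sign)
--     if rulers is None or not (0 <= sign_degrees < 30):
--         return None
--     return rulers[int(sign_degrees // 10)]
-- ===== Notes on version B (the rewrite author's own statement) =====
-- stated objective: simpler
-- what changed: Replaced the per-decan window-scan over (ruler, start, end) triples with a compact sign -> [3 rulers] table and a single bounds check plus closed-form index sign_degrees // 10.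
import Mathlib
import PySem

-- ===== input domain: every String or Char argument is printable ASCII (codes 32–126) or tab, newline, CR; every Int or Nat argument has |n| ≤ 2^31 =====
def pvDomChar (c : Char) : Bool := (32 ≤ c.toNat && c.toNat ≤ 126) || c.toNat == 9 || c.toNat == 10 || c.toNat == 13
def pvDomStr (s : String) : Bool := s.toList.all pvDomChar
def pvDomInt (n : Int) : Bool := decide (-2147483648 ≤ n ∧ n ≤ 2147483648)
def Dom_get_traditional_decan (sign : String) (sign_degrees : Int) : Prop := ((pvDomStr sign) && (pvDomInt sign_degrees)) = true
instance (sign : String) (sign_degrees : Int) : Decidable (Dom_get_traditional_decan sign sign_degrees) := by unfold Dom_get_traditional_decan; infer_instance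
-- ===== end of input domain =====

-- B replaces A's per-decan window scan with a sign -> [3 rulers] table, a bounds check and the closed-form index sign_degrees // 10 (objective: simpler).

-- ===== PORT A =====
def pvDecansA : PySem.Dict String (List (String × Int × Int)) := PySem.Dict.ofList [
  ("Aries",       [("Mars",0,10),("Sun",10,20),("Venus",20,30)]),
  ("Taurus",      [("Mercury",0,10),("Moon",10,20),("Saturn",20,30)]),
  ("Gemini",      [("Jupiter",0,10),("Mars",10,20),("Sun",20,30)]),
  ("Cancer",      [("Venus",0,10),("Mercury",10,20),("Moon",20,30)]),
  ("Leo",         [("Saturn",0,10),("Jupiter",10,20),("Mars",20,30)]),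
  ("Virgo",       [("Sun",0,10),("Venus",10,20),("Mercury",20,30)]),
  ("Libra",       [("Moon",0,10),("Saturn",10,20),("Jupiter",20,30)]),
  ("Scorpio",     [("Mars",0,10),("Sun",10,20),("Venus",20,30)]),
  ("Sagittarius", [("Mercury",0,10),("Moon",10,20),("Saturn",20,30)]),
  ("Capricorn",   [("Jupiter",0,10),("Mars",10,20),("Sun",20,30)]),
  ("Aquarius",    [("Venus",0,10),("Mercury",10,20),("Moon",20,30)]),
  ("Pisces",      [("Saturn",0,10),("Jupiter",10,20),("Mars",20,30)])]

-- the 'for ruler, start, end in …: if start <= sign_degrees < end: return ruler' loop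
def pvScanA (d : Int) : List (String × Int × Int) → Option String
  | [] => none
  | (r, s, e) :: rest => if s ≤ d ∧ d < e then some r else pvScanA d rest

def get_traditional_decan (sign : String) (sign_degrees : Int) : Option String :=
  pvScanA sign_degrees (pvDecansA.getD sign [])

-- ===== PORT B =====
def pvRulersB : PySem.Dict String (List String) := PySem.Dict.ofList [
  ("Aries",       ["Mars","Sun","Venus"]),
  ("Taurus",      ["Mercury","Moon","Saturn"]),
  ("Gemini",      ["Jupiter","Mars","Sun"]),
  ("Cancer",      ["Venus","Mercury","Moon"]),
  ("Leo",         ["Saturn","Jupiter","Mars"]),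
  ("Virgo",       ["Sun","Venus","Mercury"]),
  ("Libra",       ["Moon","Saturn","Jupiter"]),
  ("Scorpio",     ["Mars","Sun","Venus"]),
  ("Sagittarius", ["Mercury","Moon","Saturn"]),
  ("Capricorn",   ["Jupiter","Mars","Sun"]),
  ("Aquarius",    ["Venus","Mercury","Moon"]),
  ("Pisces",      ["Saturn","Jupiter","Mars"])]

-- rulers[sign_degrees // 10] is in range whenever the bounds check passes, so pyGet? is some there
def get_traditional_decan_alt (sign : String) (sign_degrees : Int) : Option String :=
  match pvRulersB.get? sign with
  | none => none
  | some rs =>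
    if 0 ≤ sign_degrees ∧ sign_degrees < 30 then
      PySem.List.pyGet? rs (PySem.Int.floordiv sign_degrees 10)
    else none

-- ===== PRECONDITION & SPEC =====
def Spec_get_traditional_decan (sign : String) (sign_degrees : Int) (out : Option String) : Prop := out = get_traditional_decan_alt sign sign_degrees
instance (sign : String) (sign_degrees : Int) (out : Option String) : Decidable (Spec_get_traditional_decan sign sign_degrees out) := by unfold Spec_get_traditional_decan; infer_instance

-- ===== CLAIM (what is proved, stated in full; the proofs are below) =====
def Claim_equal_get_traditional_decan : Prop := ∀ (sign : String) (sign_degrees : Int), Dom_get_traditional_decan sign sign_degrees → Spec_get_traditional_decan sign sign_degrees (get_traditional_decan sign sign_degrees)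

-- ===== LEMMAS AND PROOFS =====

-- the scan over one sign's three decan windows equals the closed-form index
theorem pv_tri (r0 r1 r2 : String) (d : Int) :
    pvScanA d [(r0,0,10),(r1,10,20),(r2,20,30)] =
    (if 0 ≤ d ∧ d < 30 then PySem.List.pyGet? [r0,r1,r2] (PySem.Int.floordiv d 10) else none) := by
  rw [PySem.Int.floordiv_eq_ediv_of_pos (by norm_num : (0:Int) < 10)]
  simp only [pvScanA]
  split_ifs with h1 h2 h3 h4 <;> first
  | rfl
  | omega
  | · have h0 : d / 10 = 0 := by omega
      rw [h0]; simp [PySem.List.pyGet?, PySem.List.pyIdx?]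
  | · have h0 : d / 10 = 1 := by omega
      rw [h0]; simp [PySem.List.pyGet?, PySem.List.pyIdx?]
  | · have h0 : d / 10 = 2 := by omega
      rw [h0]; simp [PySem.List.pyGet?, PySem.List.pyIdx?]

-- ===== VERDICT (by name: the statement is the Claim_ definition above) =====
theorem get_traditional_decan_spec : Claim_equal_get_traditional_decan := by
  intro sign d _
  unfold Spec_get_traditional_decan get_traditional_decan get_traditional_decan_alt
  by_cases h1 : sign = "Aries"
  · subst h1
    rw [show pvDecansA.getD "Aries" [] = [("Mars",0,10),("Sun",10,20),("Venus",20,30)] from by decide,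
        show pvRulersB.get? "Aries" = some ["Mars","Sun","Venus"] from by decide]
    exact pv_tri _ _ _ d
  by_cases h2 : sign = "Taurus"
  · subst h2
    rw [show pvDecansA.getD "Taurus" [] = [("Mercury",0,10),("Moon",10,20),("Saturn",20,30)] from by decide,
        show pvRulersB.get? "Taurus" = some ["Mercury","Moon","Saturn"] from by decide]
    exact pv_tri _ _ _ d
  by_cases h3 : sign = "Gemini"
  · subst h3
    rw [show pvDecansA.getD "Gemini" [] = [("Jupiter",0,10),("Mars",10,20),("Sun",20,30)] from by decide,
        show pvRulersB.get? "Gemini" = some ["Jupiter","Mars","Sun"] from by decide]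
    exact pv_tri _ _ _ d
  by_cases h4 : sign = "Cancer"
  · subst h4
    rw [show pvDecansA.getD "Cancer" [] = [("Venus",0,10),("Mercury",10,20),("Moon",20,30)] from by decide,
        show pvRulersB.get? "Cancer" = some ["Venus","Mercury","Moon"] from by decide]
    exact pv_tri _ _ _ d
  by_cases h5 : sign = "Leo"
  · subst h5
    rw [show pvDecansA.getD "Leo" [] = [("Saturn",0,10),("Jupiter",10,20),("Mars",20,30)] from by decide,
        show pvRulersB.get? "Leo" = some ["Saturn","Jupiter","Mars"] from by decide]
    exact pv_tri _ _ _ d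
  by_cases h6 : sign = "Virgo"
  · subst h6
    rw [show pvDecansA.getD "Virgo" [] = [("Sun",0,10),("Venus",10,20),("Mercury",20,30)] from by decide,
        show pvRulersB.get? "Virgo" = some ["Sun","Venus","Mercury"] from by decide]
    exact pv_tri _ _ _ d
  by_cases h7 : sign = "Libra"
  · subst h7
    rw [show pvDecansA.getD "Libra" [] = [("Moon",0,10),("Saturn",10,20),("Jupiter",20,30)] from by decide,
        show pvRulersB.get? "Libra" = some ["Moon","Saturn","Jupiter"] from by decide]
    exact pv_tri _ _ _ d
  by_cases h8 : sign = "Scorpio"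
  · subst h8
    rw [show pvDecansA.getD "Scorpio" [] = [("Mars",0,10),("Sun",10,20),("Venus",20,30)] from by decide,
        show pvRulersB.get? "Scorpio" = some ["Mars","Sun","Venus"] from by decide]
    exact pv_tri _ _ _ d
  by_cases h9 : sign = "Sagittarius"
  · subst h9
    rw [show pvDecansA.getD "Sagittarius" [] = [("Mercury",0,10),("Moon",10,20),("Saturn",20,30)] from by decide,
        show pvRulersB.get? "Sagittarius" = some ["Mercury","Moon","Saturn"] from by decide]
    exact pv_tri _ _ _ d
  by_cases h10 : sign = "Capricorn"
  · subst h10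
    rw [show pvDecansA.getD "Capricorn" [] = [("Jupiter",0,10),("Mars",10,20),("Sun",20,30)] from by decide,
        show pvRulersB.get? "Capricorn" = some ["Jupiter","Mars","Sun"] from by decide]
    exact pv_tri _ _ _ d
  by_cases h11 : sign = "Aquarius"
  · subst h11
    rw [show pvDecansA.getD "Aquarius" [] = [("Venus",0,10),("Mercury",10,20),("Moon",20,30)] from by decide,
        show pvRulersB.get? "Aquarius" = some ["Venus","Mercury","Moon"] from by decide]
    exact pv_tri _ _ _ d
  by_cases h12 : sign = "Pisces"
  · subst h12
    rw [show pvDecansA.getD "Pisces" [] = [("Saturn",0,10),("Jupiter",10,20),("Mars",20,30)] from by decide,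
        show pvRulersB.get? "Pisces" = some ["Saturn","Jupiter","Mars"] from by decide]
    exact pv_tri _ _ _ d
  · rw [show pvDecansA.getD sign [] = [] from by
        simp [pvDecansA, PySem.Dict.ofList, PySem.Dict.update, List.foldl,
              PySem.Dict.getD_insert, PySem.Dict.getD_empty, h1, h2, h3, h4, h5, h6, h7, h8, h9, h10, h11, h12],
       show pvRulersB.get? sign = none from by
        simp [pvRulersB, PySem.Dict.ofList, PySem.Dict.update, List.foldl,
              PySem.Dict.get?_insert, PySem.Dict.get?_empty, h1, h2, h3, h4, h5, h6, h7, h8, h9, h10, h11, h12]]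
    rfl
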